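-- pv_equiv track=rewrite | github.com/rtehok/perso-python | leetcode/349_intersection-of-two-arrays.py | intersectionDict
-- ===== SOURCE A (Python) =====
-- from typing import List
--
-- def intersectionDict(nums1: List[int], nums2: List[int]) -> List[int]:
--     seen = set()
--     res = []
--
--     for x in nums1:
--         seen.add(x)
--
--     for x in nums2:
--         if x in seen:
--             res.append(x)
--             seen.remove(x)
--
--     return res
-- ===== SOURCE B (Python) =====
-- from typing import List
--
-- def intersectionDict(nums1: List[int], nums2: List[int]) -> List[int]:
--     # stateless: keep nums2[i] iff it occurs in nums1 and this is its first occurrence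
--     return [v for i, v in enumerate(nums2) if v in nums1 and v not in nums2[:i]]
-- ===== Notes on version B (the rewrite author's own statement) =====
-- stated objective: simpler
-- what changed: A maintains a mutable 'seen' hash set (filled from nums1, elements removed as matched) across two loops; B is a single stateless comprehension that keeps nums2[i] iff it is in nums1 and does not occur in the prefix nums2[:i], enforcing uniqueness by a prefix-membership test instead of any auxiliary structure.
import Mathlib
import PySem

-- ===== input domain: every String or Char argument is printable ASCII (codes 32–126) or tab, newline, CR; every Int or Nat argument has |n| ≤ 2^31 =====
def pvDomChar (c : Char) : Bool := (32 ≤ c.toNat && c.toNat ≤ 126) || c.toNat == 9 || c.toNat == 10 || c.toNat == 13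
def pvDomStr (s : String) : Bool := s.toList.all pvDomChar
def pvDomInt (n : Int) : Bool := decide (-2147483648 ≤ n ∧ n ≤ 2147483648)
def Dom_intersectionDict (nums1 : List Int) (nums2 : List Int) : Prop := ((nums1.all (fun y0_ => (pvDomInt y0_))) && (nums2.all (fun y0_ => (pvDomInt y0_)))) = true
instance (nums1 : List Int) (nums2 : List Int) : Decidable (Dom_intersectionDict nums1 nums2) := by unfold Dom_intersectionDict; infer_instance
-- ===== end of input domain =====

-- B replaces A's two loops with a mutated 'seen' set by one stateless comprehension testing the prefix nums2[:i]; simpler, no auxiliary structure (slower on large inputs).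

-- ===== PORT A =====
-- for x in nums2: if x in seen: res.append(x); seen.remove(x)
-- seen.remove(x) runs only under the 'x in seen' guard, so KeyError is unreachable and remove = discard.
def intersectionDict (nums1 : List Int) (nums2 : List Int) : List Int :=
  let seen : PySem.Set Int := nums1.foldl PySem.Set.add PySem.Set.empty
  let st := nums2.foldl
    (fun (st : PySem.Set Int × List Int) x =>
      if PySem.Set.contains st.1 x then (PySem.Set.discard st.1 x, st.2 ++ [x]) else st)
    (seen, [])
  st.2

-- ===== PORT B =====
-- [v for i, v in enumerate(nums2) if v in nums1 and v not in nums2[:i]]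
def intersectionDict_alt (nums1 : List Int) (nums2 : List Int) : List Int :=
  ((PySem.List.enumerate nums2 0).filter
      (fun p => nums1.contains p.2 && !(PySem.List.slice nums2 none (some p.1)).contains p.2)).map
    (fun p => p.2)

-- ===== PRECONDITION & SPEC =====
def Spec_intersectionDict (nums1 : List Int) (nums2 : List Int) (out : List Int) : Prop := out = intersectionDict_alt nums1 nums2
instance (nums1 : List Int) (nums2 : List Int) (out : List Int) : Decidable (Spec_intersectionDict nums1 nums2 out) := by unfold Spec_intersectionDict; infer_instance

-- ===== CLAIM (what is proved, stated in full; the proofs are below) =====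
def Claim_equal_intersectionDict : Prop := ∀ (nums1 : List Int) (nums2 : List Int), Dom_intersectionDict nums1 nums2 → Spec_intersectionDict nums1 nums2 (intersectionDict nums1 nums2)

-- ===== LEMMAS AND PROOFS =====

-- coupling invariant for A's loop: started with seen = {y ∈ c | y ∉ acc} and result acc, it
-- produces what a guarded-Set.add fold over the same tail produces from acc
theorem intersectionDict_loop_eq (l : List Int) (c acc : List Int) :
    (l.foldl
      (fun (st : PySem.Set Int × List Int) x =>
        if PySem.Set.contains st.1 x then (PySem.Set.discard st.1 x, st.2 ++ [x]) else st)
      (c.filter (fun y => !acc.contains y), acc)).2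
    = l.foldl (fun a x => if List.contains c x then PySem.Set.add a x else a) acc := by
  induction l generalizing acc with
  | nil => rfl
  | cons x t ih =>
    simp only [List.foldl_cons]
    by_cases hc : x ∈ c
    · by_cases ha : x ∈ acc
      · have h1 : PySem.Set.contains (c.filter (fun y => !acc.contains y)) x = false := by
          simp [PySem.Set.contains, List.contains_eq_mem, ha]
        have h2 : PySem.Set.add acc x = acc := by
          simp [PySem.Set.add, List.contains_eq_mem, ha]
        simp only [h1, Bool.false_eq_true, if_false,
          if_pos (by simpa [List.contains_eq_mem] using hc : List.contains c x = true), h2]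
        exact ih acc
      · have h1 : PySem.Set.contains (c.filter (fun y => !acc.contains y)) x = true := by
          simp [PySem.Set.contains, List.contains_eq_mem, hc, ha]
        have h2 : PySem.Set.add acc x = acc ++ [x] := by
          simp [PySem.Set.add, List.contains_eq_mem, ha]
        have h3 : PySem.Set.discard (c.filter (fun y => !acc.contains y)) x
            = c.filter (fun y => !(acc ++ [x]).contains y) := by
          simp only [PySem.Set.discard, List.filter_filter]
          apply List.filter_congr
          intro y _
          by_cases hyx : y = x <;> by_cases hya : y ∈ acc <;>
            simp [hyx, hya, List.contains_eq_mem]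
        simp only [h1, if_true,
          if_pos (by simpa [List.contains_eq_mem] using hc : List.contains c x = true), h3, h2]
        exact ih (acc ++ [x])
    · have h1 : PySem.Set.contains (c.filter (fun y => !acc.contains y)) x = false := by
        simp [PySem.Set.contains, List.contains_eq_mem, hc]
      simp only [h1, Bool.false_eq_true, if_false,
        if_neg (by simpa [List.contains_eq_mem] using hc : ¬ List.contains c x = true)]
      exact ih acc

-- coupling invariant for B: the guarded-Set.add fold over the tail l, started from acc holding
-- exactly the common elements of the prefix pre, equals acc ++ B's filtered-enumerate over l
theorem intersectionDict_alt_loop_eq (nums1 full : List Int) :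
    ∀ (l pre acc : List Int), full = pre ++ l →
    (∀ x, x ∈ acc ↔ (x ∈ nums1 ∧ x ∈ pre)) →
    l.foldl (fun a x => if List.contains nums1 x then PySem.Set.add a x else a) acc
    = acc ++ ((PySem.List.enumerate l (pre.length : Int)).filter
        (fun p => nums1.contains p.2 && !(PySem.List.slice full none (some p.1)).contains p.2)).map
      (fun p => p.2) := by
  intro l
  induction l with
  | nil => intro pre acc _ _; simp [PySem.List.enumerate_nil]
  | cons x t ih =>
    intro pre acc hfull hacc
    have hslice : PySem.List.slice full none (some (pre.length : Int)) = pre := by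
      rw [PySem.List.slice_to _ (by positivity), Int.toNat_natCast, hfull, List.take_left]
    have hlen : ((pre ++ [x]).length : Int) = (pre.length : Int) + 1 := by
      simp
    have hfull' : full = (pre ++ [x]) ++ t := by simpa [List.append_assoc] using hfull
    simp only [List.foldl_cons, PySem.List.enumerate_cons, List.filter_cons, hslice]
    by_cases hx1 : x ∈ nums1
    · by_cases hxp : x ∈ pre
      · have hcond : (nums1.contains x && !pre.contains x) = false := by
          simp [List.contains_eq_mem, hxp]
        have hxa : x ∈ acc := (hacc x).2 ⟨hx1, hxp⟩
        have hadd : PySem.Set.add acc x = acc := by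
          simp [PySem.Set.add, List.contains_eq_mem, hxa]
        have hacc' : ∀ y, y ∈ acc ↔ (y ∈ nums1 ∧ y ∈ pre ++ [x]) := by
          intro y
          rw [hacc y]
          constructor
          · rintro ⟨h1, h2⟩; exact ⟨h1, by simp [h2]⟩
          · rintro ⟨h1, h2⟩
            rcases (by simpa using h2 : y ∈ pre ∨ y = x) with h | rfl
            · exact ⟨h1, h⟩
            · exact ⟨h1, hxp⟩
        simp only [hcond, Bool.false_eq_true, if_false,
          if_pos (by simpa [List.contains_eq_mem] using hx1 : List.contains nums1 x = true), hadd]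
        rw [ih (pre ++ [x]) acc hfull' hacc', hlen]
      · have hcond : (nums1.contains x && !pre.contains x) = true := by
          simp [List.contains_eq_mem, hx1, hxp]
        have hxa : x ∉ acc := fun h => hxp ((hacc x).1 h).2
        have hadd : PySem.Set.add acc x = acc ++ [x] := by
          simp [PySem.Set.add, List.contains_eq_mem, hxa]
        have hacc' : ∀ y, y ∈ acc ++ [x] ↔ (y ∈ nums1 ∧ y ∈ pre ++ [x]) := by
          intro y
          constructor
          · intro h
            rcases (by simpa using h : y ∈ acc ∨ y = x) with h | rfl
            · obtain ⟨h1, h2⟩ := (hacc y).1 h; exact ⟨h1, by simp [h2]⟩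
            · exact ⟨hx1, by simp⟩
          · rintro ⟨h1, h2⟩
            rcases (by simpa using h2 : y ∈ pre ∨ y = x) with h | rfl
            · exact (by simp [(hacc y).2 ⟨h1, h⟩])
            · simp
        simp only [hcond, if_true,
          if_pos (by simpa [List.contains_eq_mem] using hx1 : List.contains nums1 x = true), hadd]
        rw [ih (pre ++ [x]) (acc ++ [x]) hfull' hacc', hlen]
        simp
    · have hcond : (nums1.contains x && !pre.contains x) = false := by
        simp [List.contains_eq_mem, hx1]
      have hacc' : ∀ y, y ∈ acc ↔ (y ∈ nums1 ∧ y ∈ pre ++ [x]) := by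
        intro y
        rw [hacc y]
        constructor
        · rintro ⟨h1, h2⟩; exact ⟨h1, by simp [h2]⟩
        · rintro ⟨h1, h2⟩
          rcases (by simpa using h2 : y ∈ pre ∨ y = x) with h | rfl
          · exact ⟨h1, h⟩
          · exact absurd h1 hx1
      simp only [hcond, Bool.false_eq_true, if_false,
        if_neg (by simpa [List.contains_eq_mem] using hx1 : ¬ List.contains nums1 x = true)]
      rw [ih (pre ++ [x]) acc hfull' hacc', hlen]

-- ===== VERDICT (by name: the statement is the Claim_ definition above) =====
theorem intersectionDict_spec : Claim_equal_intersectionDict := by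
  intro nums1 nums2 _
  unfold Spec_intersectionDict intersectionDict
  have h0 : (nums1.foldl PySem.Set.add PySem.Set.empty)
      = (nums1.foldl PySem.Set.add PySem.Set.empty).filter
          (fun y => !([] : List Int).contains y) := by
    simp
  conv_lhs => rw [h0]
  rw [intersectionDict_loop_eq]
  have hc : nums2.foldl
      (fun a x => if List.contains (nums1.foldl PySem.Set.add PySem.Set.empty) x
                  then PySem.Set.add a x else a) ([] : List Int)
      = nums2.foldl (fun a x => if List.contains nums1 x then PySem.Set.add a x else a)
          ([] : List Int) := by
    apply PySem.List.foldl_congr_mem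
    intro acc x _
    have : List.contains (nums1.foldl PySem.Set.add PySem.Set.empty) x
        = List.contains nums1 x := by
      simp only [List.contains_eq_mem]
      rw [show nums1.foldl PySem.Set.add PySem.Set.empty = PySem.Set.ofList nums1 from
        (PySem.Set.ofList_eq_foldl nums1).symm]
      simp [PySem.Set.mem_ofList]
    rw [this]
  rw [hc]
  rw [intersectionDict_alt_loop_eq nums1 nums2 nums2 [] [] rfl (by simp)]
  simp [intersectionDict_alt]
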